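-- pv_equiv track=rewrite | github.com/nodarisvanidze88/Task-30-Re-requesting-a-Vanity-Plate | Requesting_a_Vanity_Plate.py | checkPunctuation
-- ===== SOURCE A (Python) =====
-- def checkPunctuation(txt):
--     chars = '.,/-_!#@ -+=$"()\''
--     for i in txt:
--         if i in chars:
--             return True
--         else:
--             continue
--     return False
-- ===== SOURCE B (Python) =====
-- _PUNCT = frozenset('.,/-_!#@ -+=$"()\'')
--
-- def checkPunctuation(txt):
--     return bool(set(txt) & _PUNCT)
-- ===== Notes on version B (the rewrite author's own statement) =====
-- stated objective: idiomatic
-- what changed: Replaces the explicit character-by-character short-circuit scan (membership test against a string on every character) with a one-liner that deduplicates the text into a set and tests its intersection with a precomputed frozenset of punctuation for non-emptiness.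
import Mathlib
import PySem

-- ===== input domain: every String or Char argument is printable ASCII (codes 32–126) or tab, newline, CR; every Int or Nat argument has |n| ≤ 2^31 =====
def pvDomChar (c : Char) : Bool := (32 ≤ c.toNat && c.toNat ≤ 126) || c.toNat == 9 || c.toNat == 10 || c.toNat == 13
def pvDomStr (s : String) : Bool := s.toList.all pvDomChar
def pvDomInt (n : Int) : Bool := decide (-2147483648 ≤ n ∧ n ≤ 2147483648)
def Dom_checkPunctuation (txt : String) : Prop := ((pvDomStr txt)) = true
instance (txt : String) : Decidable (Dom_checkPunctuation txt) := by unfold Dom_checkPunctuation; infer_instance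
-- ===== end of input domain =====

-- B replaces A's character-by-character short-circuit scan with a set-intersection
-- of the deduplicated text characters and a precomputed punctuation set (idiomatic).

-- ===== PORT A =====
-- chars = '.,/-_!#@ -+=$"()\''
def cpChars : List Char := ".,/-_!#@ -+=$\"()'".toList

-- for i in txt: if i in chars: return True else: continue; return False
def cpLoopA : List Char → Bool
  | [] => false
  | c :: rest => if cpChars.contains c then true else cpLoopA rest

def checkPunctuation (txt : String) : Bool := cpLoopA txt.toList

-- ===== PORT B =====
-- _PUNCT = frozenset('.,/-_!#@ -+=$"()\'')
def cpPunct : PySem.Set Char := PySem.Set.ofList ".,/-_!#@ -+=$\"()'".toList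

-- return bool(set(txt) & _PUNCT)
def checkPunctuation_alt (txt : String) : Bool :=
  !(PySem.Set.inter (PySem.Set.ofList txt.toList) cpPunct).isEmpty

-- ===== PRECONDITION & SPEC =====
def Spec_checkPunctuation (txt : String) (out : Bool) : Prop := out = checkPunctuation_alt txt
instance (txt : String) (out : Bool) : Decidable (Spec_checkPunctuation txt out) := by unfold Spec_checkPunctuation; infer_instance

-- ===== CLAIM (what is proved, stated in full; the proofs are below) =====
def Claim_equal_checkPunctuation : Prop := ∀ (txt : String), Dom_checkPunctuation txt → Spec_checkPunctuation txt (checkPunctuation txt)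

-- ===== LEMMAS AND PROOFS =====

theorem cpLoopA_eq_any (l : List Char) : cpLoopA l = l.any (fun c => cpChars.contains c) := by
  induction l with
  | nil => rfl
  | cons c rest ih => simp [cpLoopA, List.any_cons, ih]

-- ===== VERDICT (by name: the statement is the Claim_ definition above) =====
theorem checkPunctuation_spec : Claim_equal_checkPunctuation := by
  intro txt _
  unfold Spec_checkPunctuation checkPunctuation checkPunctuation_alt
  rw [cpLoopA_eq_any, Bool.eq_iff_iff]
  constructor
  · intro h
    obtain ⟨c, hc, hcc⟩ := List.any_eq_true.mp h
    have hmem : c ∈ PySem.Set.inter (PySem.Set.ofList txt.toList) cpPunct := by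
      rw [PySem.Set.mem_inter]
      exact ⟨(PySem.Set.mem_ofList _ _).mpr hc, by simpa [cpPunct, PySem.Set.mem_ofList, cpChars] using hcc⟩
    simp only [Bool.not_eq_true', ← Bool.not_eq_true, List.isEmpty_iff]
    intro hnil
    rw [hnil] at hmem
    exact absurd hmem (List.not_mem_nil)
  · intro h
    have hne : PySem.Set.inter (PySem.Set.ofList txt.toList) cpPunct ≠ [] := by
      intro hnil
      simp [hnil] at h
    obtain ⟨c, hmem⟩ := List.exists_mem_of_ne_nil _ hne
    rw [PySem.Set.mem_inter] at hmem
    refine List.any_eq_true.mpr ⟨c, (PySem.Set.mem_ofList _ _).mp hmem.1, ?_⟩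
    simpa [cpPunct, PySem.Set.mem_ofList, cpChars] using hmem.2
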